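-- pv_equiv track=rewrite | github.com/croner01/logoscope | shared_src/utils/logging_config.py | is_health_check_path
-- ===== SOURCE A (Python) =====
-- HEALTH_CHECK_PATHS = (
--     "/health",
--     "/healthz",
--     "/ready",
--     "/readiness",
--     "/live",
--     "/liveness",
-- )
--
-- def _normalize_path(path: str) -> str:
--     """规范化请求路径，去除 query string 与尾部斜杠。"""
--     raw = str(path or "").strip()
--     if not raw:
--         return ""
--     raw = raw.split("?", 1)[0]
--     if not raw.startswith("/"):
--         raw = f"/{raw}"
--     if raw != "/":
--         raw = raw.rstrip("/")
--     return raw.lower()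
--
-- def is_health_check_path(path: str) -> bool:
--     """判断路径是否为健康检查路径。"""
--     normalized = _normalize_path(path)
--     if not normalized:
--         return False
--     return any(
--         normalized == candidate or normalized.startswith(f"{candidate}/")
--         for candidate in HEALTH_CHECK_PATHS
--     )
-- ===== SOURCE B (Python) =====
-- HEALTH_SEGMENTS = frozenset({
--     "health", "healthz", "ready", "readiness", "live", "liveness",
-- })
--
-- def is_health_check_path(path: str) -> bool:
--     """判断路径是否为健康检查路径。"""
--     raw = str(path or "").strip()
--     if not raw:
--         return False
--     q = raw.split("?", 1)[0]
--     if q.startswith("/"):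
--         q = q[1:]
--     seg = q.split("/", 1)[0].lower()
--     return seg in HEALTH_SEGMENTS
-- ===== Notes on version B (the rewrite author's own statement) =====
-- stated objective: simpler
-- what changed: Instead of normalizing the whole path (prepend slash, rstrip trailing slashes, lowercase) and scanning all six '/'-prefixed candidates with an equality-or-prefix test each, B extracts the first path segment directly from the query-trimmed string (drop one leading slash, cut at the next '/'), lowercases just that segment, and does a single membership test in a frozenset of bare segment names.
import Mathlib
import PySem

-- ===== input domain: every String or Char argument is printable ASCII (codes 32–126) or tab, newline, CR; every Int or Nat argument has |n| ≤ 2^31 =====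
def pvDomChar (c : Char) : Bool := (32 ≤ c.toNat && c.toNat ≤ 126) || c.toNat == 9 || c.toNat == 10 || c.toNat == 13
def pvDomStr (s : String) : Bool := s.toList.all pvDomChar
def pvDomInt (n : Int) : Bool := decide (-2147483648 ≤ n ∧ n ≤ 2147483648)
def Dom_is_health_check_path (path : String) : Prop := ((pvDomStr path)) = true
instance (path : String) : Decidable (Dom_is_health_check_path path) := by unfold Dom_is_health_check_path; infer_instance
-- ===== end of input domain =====

-- B replaces A's per-candidate equality-or-prefix scan over full paths by extracting the first
-- path segment directly from the stripped/query-trimmed string and testing its membership in a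
-- set of bare segment names (objective: simpler).


-- ===== PORT A =====
-- HEALTH_CHECK_PATHS (module constant of Source A)
def hcPaths : List (List Char) :=
  [['/','h','e','a','l','t','h'], ['/','h','e','a','l','t','h','z'],
   ['/','r','e','a','d','y'], ['/','r','e','a','d','i','n','e','s','s'],
   ['/','l','i','v','e'], ['/','l','i','v','e','n','e','s','s']]

-- raw.rstrip("/") has no PySem primitive; ported by hand as dropping the trailing run of '/'
-- characters (reverse, dropWhile (· == '/'), reverse) — exact for Python's str.rstrip("/").
def rstripSlash (l : List Char) : List Char := (l.reverse.dropWhile (· == '/')).reverse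

-- _normalize_path (helper of Source A), on the char list of the path.
def pvNormChars (l : List Char) : List Char :=
  let raw := PySem.Chars.strip l
  if raw = [] then []
  else
    let raw := (PySem.Chars.splitOnMax raw ['?'] 1).headD []
    let raw := if PySem.Chars.startswith raw ['/'] then raw else '/' :: raw
    let raw := if raw ≠ ['/'] then rstripSlash raw else raw
    PySem.Chars.lower raw

def is_health_check_path (path : String) : Bool :=
  let normalized := pvNormChars path.toList
  if normalized = [] then false
  else hcPaths.any (fun c =>
    normalized == c || PySem.Chars.startswith normalized (c ++ ['/']))

-- ===== PORT B =====
-- HEALTH_SEGMENTS (module constant of Source B): bare first-segment names, no slashes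
def hcSegs : PySem.Set (List Char) := PySem.Set.ofList
  [['h','e','a','l','t','h'], ['h','e','a','l','t','h','z'],
   ['r','e','a','d','y'], ['r','e','a','d','i','n','e','s','s'],
   ['l','i','v','e'], ['l','i','v','e','n','e','s','s']]

def is_health_check_path_alt (path : String) : Bool :=
  let raw := PySem.Chars.strip path.toList
  if raw = [] then false
  else
    let q := (PySem.Chars.splitOnMax raw ['?'] 1).headD []
    let q := if PySem.Chars.startswith q ['/'] then PySem.Chars.slice q (some 1) none else q
    let seg := PySem.Chars.lower ((PySem.Chars.splitOnMax q ['/'] 1).headD [])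
    PySem.Set.contains hcSegs seg

-- ===== PRECONDITION & SPEC =====
def Spec_is_health_check_path (path : String) (out : Bool) : Prop := out = is_health_check_path_alt path
instance (path : String) (out : Bool) : Decidable (Spec_is_health_check_path path out) := by unfold Spec_is_health_check_path; infer_instance

-- ===== CLAIM (what is proved, stated in full; the proofs are below) =====
def Claim_equal_is_health_check_path : Prop := ∀ (path : String), Dom_is_health_check_path path → Spec_is_health_check_path path (is_health_check_path path)

-- ===== LEMMAS AND PROOFS =====

-- splitOnMax.go with maxsplit budget 0 collects the rest as a single piece.
theorem go_m0 (fuel : Nat) : ∀ (l cur : List Char) (acc : List (List Char)),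
    PySem.Chars.splitOnMax.go ['/'] fuel 0 l cur acc = ((cur.reverse ++ l) :: acc).reverse := by
  induction fuel with
  | zero => intro l cur acc; simp [PySem.Chars.splitOnMax.go]
  | succ n ih => intro l cur acc; cases l <;> simp [PySem.Chars.splitOnMax.go]

-- The first piece of l.split("/", 1) is the longest '/'-free prefix of l.
theorem go_head (fuel : Nat) : ∀ (l cur : List Char), l.length ≤ fuel →
    (PySem.Chars.splitOnMax.go ['/'] fuel 1 l cur []).head?.getD []
      = cur.reverse ++ l.takeWhile (· != '/') := by
  induction fuel with
  | zero => intro l cur h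
            have : l = [] := by cases l <;> simp_all
            subst this; simp [PySem.Chars.splitOnMax.go]
  | succ n ih =>
      intro l cur h
      cases l with
      | nil => simp [PySem.Chars.splitOnMax.go]
      | cons c rest =>
        by_cases hc : c = '/'
        · subst hc
          simp [PySem.Chars.splitOnMax.go, List.isPrefixOf, go_m0]
        · have : List.isPrefixOf ['/'] (c :: rest) = false := by
            simp [List.isPrefixOf]; exact fun h => absurd h.symm hc
          simp [PySem.Chars.splitOnMax.go, this, hc]
          rw [ih rest (c :: cur) (by simpa using Nat.le_of_succ_le_succ h)]
          simp

theorem splitHead (l : List Char) :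
    (PySem.Chars.splitOnMax l ['/'] 1).headD [] = l.takeWhile (· != '/') := by
  unfold PySem.Chars.splitOnMax
  rw [if_neg (by norm_num)]
  rw [List.headD_eq_head?_getD]; simpa using go_head (l.length + 1) l [] (by omega)

theorem tw_append (cs u : List Char) (h : ('/' : Char) ∉ cs) :
    (cs ++ '/' :: u).takeWhile (· != '/') = cs := by
  induction cs with
  | nil => simp
  | cons c cs ih =>
    have hc : c ≠ '/' := fun hc => h (by simp [hc])
    simp only [List.cons_append, List.takeWhile_cons]
    simp [hc, ih (fun hm => h (by simp [hm]))]

-- For a '/'-free candidate tail cs, "equal or a proper prefix followed by '/'"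
-- is exactly "the first segment equals cs".
theorem seg (cs rest : List Char) (h : ('/' : Char) ∉ cs) :
    (rest = cs ∨ (cs ++ ['/']) <+: rest) ↔ rest.takeWhile (· != '/') = cs := by
  constructor
  · rintro (rfl | ⟨u, hu⟩)
    · exact List.takeWhile_eq_self_iff.2 (fun x hx => by
        simp; exact fun hx' => h (hx' ▸ hx))
    · rw [← hu]
      simpa using tw_append cs u h
  · intro htw
    have hsplit := List.takeWhile_append_dropWhile (p := (· != '/')) (l := rest)
    rw [htw] at hsplit
    cases hd : rest.dropWhile (· != '/') with
    | nil => left; rw [hd] at hsplit; simpa using hsplit.symm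
    | cons c u =>
      right
      have hc : c = '/' := by
        have := List.head_dropWhile_not (· != '/') (l := rest) (by simp [hd])
        simp [hd] at this; exact this
      subst hc
      exact ⟨u, by rw [hd] at hsplit; simpa using hsplit⟩

theorem segB (cs rest : List Char) (h : ('/' : Char) ∉ cs) :
    ((('/' :: rest) == ('/' :: cs)) || PySem.Chars.startswith ('/' :: rest) (('/' :: cs) ++ ['/']))
      = (rest.takeWhile (· != '/') == cs) := by
  rw [Bool.eq_iff_iff]
  simp only [Bool.or_eq_true, beq_iff_eq, PySem.Chars.startswith_iff, List.cons_append,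
    List.cons_prefix_cons, List.cons.injEq, true_and]
  rw [← seg cs rest h]

-- lowerChar moves no character onto or off '/'.
theorem lowerChar_slash (c : Char) : (PySem.Chars.lowerChar c == '/') = (c == '/') := by
  unfold PySem.Chars.lowerChar
  split
  · rename_i h
    simp [PySem.Chars.isupper] at h
    have h1 : 65 ≤ c.toNat := Fin.mk_le_mk.mp h.1
    have h2 : c.toNat ≤ 90 := Fin.mk_le_mk.mp h.2
    have hv : (Char.ofNat (c.toNat + 32)).toNat = c.toNat + 32 := by
      rw [Char.toNat_ofNat, if_pos]
      unfold Nat.isValidChar; left; omega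
    have hne1 : Char.ofNat (c.toNat + 32) ≠ '/' := by
      intro he; have h3 := congrArg Char.toNat he; rw [hv] at h3
      have : c.toNat + 32 = 47 := h3; omega
    have hne2 : c ≠ '/' := by
      intro he; subst he; revert h1; decide
    simp [hne1, hne2]
  · rfl

theorem lower_map (l : List Char) : PySem.Chars.lower l = l.map PySem.Chars.lowerChar := by
  simp [PySem.Chars.lower]

-- lower commutes with taking the first '/'-separated segment.
theorem tw_lower (l : List Char) :
    (PySem.Chars.lower l).takeWhile (· != '/') = PySem.Chars.lower (l.takeWhile (· != '/')) := by
  rw [lower_map, lower_map]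
  induction l with
  | nil => simp
  | cons c cs ih =>
    have hcond : ((PySem.Chars.lowerChar c) != '/') = (c != '/') := by
      simp only [bne, lowerChar_slash]
    simp only [List.map_cons, List.takeWhile_cons, hcond]
    by_cases hc : (c != '/') = true
    · rw [if_pos hc, if_pos hc, List.map_cons, ih]
    · rw [if_neg hc, if_neg hc, List.map_nil]

theorem rstrip_cons (x : Char) (xs : List Char) :
    rstripSlash (x :: xs)
      = if rstripSlash xs = [] then (if x == '/' then [] else [x]) else x :: rstripSlash xs := by
  unfold rstripSlash
  rw [List.reverse_cons, List.dropWhile_append]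
  by_cases h : xs.reverse.dropWhile (· == '/') = []
  · rw [if_pos (by simp [h]), if_pos (by simp [h])]
    by_cases hx : (x == '/') = true
    · rw [if_pos hx]; simp [List.dropWhile, hx]
    · rw [if_neg hx]; simp [List.dropWhile, hx]
  · rw [if_neg (by simp [h]), if_neg (by simp [h])]
    simp

theorem rstrip_nil_all (xs : List Char) (h : rstripSlash xs = []) : ∀ x ∈ xs, x = '/' := by
  unfold rstripSlash at h
  have h2 : xs.reverse.dropWhile (· == '/') = [] := by
    simpa [List.reverse_eq_nil_iff] using h
  intro x hx
  have h3 := List.dropWhile_eq_nil_iff.mp h2 x (by simpa using hx)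
  simpa using h3

-- Dropping the trailing run of slashes does not change the first segment.
theorem tw_rstrip (l : List Char) :
    (rstripSlash l).takeWhile (· != '/') = l.takeWhile (· != '/') := by
  induction l with
  | nil => rfl
  | cons x xs ih =>
    rw [rstrip_cons]
    by_cases h : rstripSlash xs = []
    · rw [if_pos h]
      by_cases hx : (x == '/') = true
      · have : x = '/' := by simpa using hx
        subst this; simp
      · have hx' : x ≠ '/' := by simpa using hx
        have htw : xs.takeWhile (· != '/') = [] := by
          cases xs with
          | nil => rfl
          | cons y ys =>
            have : y = '/' := rstrip_nil_all _ h y (by simp)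
            subst this; simp
        simp [hx, hx', htw]
    · rw [if_neg h]
      by_cases hx : (x == '/') = true
      · have : x = '/' := by simpa using hx
        subst this; simp
      · have hx' : x ≠ '/' := by simpa using hx
        simp [hx', ih]

theorem lower_cons_slash (l : List Char) :
    PySem.Chars.lower ('/' :: l) = '/' :: PySem.Chars.lower l := by
  rw [lower_map, lower_map, List.map_cons]
  congr 1

theorem contains_segs (s : List Char) :
    PySem.Set.contains hcSegs s =
      (s == ['h','e','a','l','t','h'] || (s == ['h','e','a','l','t','h','z'] || (s == ['r','e','a','d','y'] || (s == ['r','e','a','d','i','n','e','s','s'] || (s == ['l','i','v','e'] || s == ['l','i','v','e','n','e','s','s']))))) := by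
  rw [show hcSegs = ([['h','e','a','l','t','h'], ['h','e','a','l','t','h','z'],
   ['r','e','a','d','y'], ['r','e','a','d','i','n','e','s','s'],
   ['l','i','v','e'], ['l','i','v','e','n','e','s','s']] : List (List Char)) from by decide]
  simp only [PySem.Set.contains, List.contains, List.elem_cons, List.elem_nil]
  cases s == ['h','e','a','l','t','h'] <;> cases s == ['h','e','a','l','t','h','z'] <;>
  cases s == ['r','e','a','d','y'] <;> cases s == ['r','e','a','d','i','n','e','s','s'] <;>
  cases s == ['l','i','v','e'] <;> cases s == ['l','i','v','e','n','e','s','s'] <;> rfl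

-- The core: for any "body" (the path after the query cut, minus its single leading slash),
-- A's scan over the full normalized path equals B's membership test of the first segment.
theorem body_eq (body : List Char) :
    (let normalized := PySem.Chars.lower
        (if ('/' :: body) ≠ ['/'] then rstripSlash ('/' :: body) else ('/' :: body));
      if normalized = [] then false
      else hcPaths.any (fun c =>
        normalized == c || PySem.Chars.startswith normalized (c ++ ['/'])))
    = PySem.Set.contains hcSegs (PySem.Chars.lower (body.takeWhile (· != '/'))) := by
  cases body with
  | nil => decide
  | cons c b2 =>
    have hne : ('/' :: c :: b2) ≠ ['/'] := by simp
    simp only [hne, ne_eq, not_false_eq_true, if_pos]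
    rw [rstrip_cons]
    simp only [show (('/' : Char) == '/') = true from rfl, if_true]
    by_cases h : rstripSlash (c :: b2) = []
    · rw [if_pos h]
      have hc : c = '/' := rstrip_nil_all _ h c (by simp)
      subst hc
      simp [PySem.Chars.lower]
      decide
    · rw [if_neg h]
      rw [lower_cons_slash]
      rw [if_neg (by simp : ¬ ('/' :: PySem.Chars.lower (rstripSlash (c :: b2)) = []))]
      simp only [hcPaths, List.any_cons, List.any_nil, Bool.or_false]
      rw [segB _ _ (by decide), segB _ _ (by decide), segB _ _ (by decide),
          segB _ _ (by decide), segB _ _ (by decide), segB _ _ (by decide)]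
      rw [tw_lower, tw_rstrip, contains_segs]

theorem main_eq (path : String) : is_health_check_path path = is_health_check_path_alt path := by
  unfold is_health_check_path is_health_check_path_alt pvNormChars
  by_cases h0 : PySem.Chars.strip path.toList = []
  · simp [h0]
  · simp only [h0, if_false]
    set q0 := (PySem.Chars.splitOnMax (PySem.Chars.strip path.toList) ['?'] 1).headD [] with hq0
    by_cases hs : PySem.Chars.startswith q0 ['/'] = true
    · rcases (PySem.Chars.startswith_iff q0 ['/']).1 hs with ⟨u, hu⟩
      rw [← hu] at hs ⊢
      simp only [PySem.Chars.slice_eq_listSlice, List.singleton_append,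
        PySem.List.slice_from_one, List.tail_cons, splitHead]
      exact body_eq u
    · simp only [hs, if_false, Bool.false_eq_true, splitHead]
      exact body_eq q0

-- ===== VERDICT (by name: the statement is the Claim_ definition above) =====
theorem is_health_check_path_spec : Claim_equal_is_health_check_path := by
  intro path _
  unfold Spec_is_health_check_path
  exact main_eq path
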